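-- pv_equiv track=rewrite | github.com/Romario27/Intro-Taller-de-Programacion | Introduccion/Codigos/Recursividad de pila/Operaciones numeros/2-3-18 recursividad pila.py | validacion
-- ===== SOURCE A (Python) =====
-- def validacion(num):
--       if num!=0:
--             if (num%10)>=0 and (num%10)<=4:
--                   return validacion(num//10)
--             else:
--                   return False
--       else:
--             return True
-- ===== SOURCE B (Python) =====
-- def validacion(num):
--     # Negative numbers always fail A's digit test (their final floor-division
--     # step leaves a residue digit >= 5), so reject them up front; otherwise
--     # materialise the decimal digits and test them all at once.
--     if num < 0:
--         return False
--     digits = []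
--     while num != 0:
--         digits.append(num % 10)
--         num //= 10
--     return all(d <= 4 for d in digits)
-- ===== Notes on version B (the rewrite author's own statement) =====
-- stated objective: alternative
-- what changed: Replaces A's tail recursion that tests each digit in-flight with an explicit-sign-check plus a loop that materialises the decimal digit list, then a single all(d <= 4) pass over it.
import Mathlib
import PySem

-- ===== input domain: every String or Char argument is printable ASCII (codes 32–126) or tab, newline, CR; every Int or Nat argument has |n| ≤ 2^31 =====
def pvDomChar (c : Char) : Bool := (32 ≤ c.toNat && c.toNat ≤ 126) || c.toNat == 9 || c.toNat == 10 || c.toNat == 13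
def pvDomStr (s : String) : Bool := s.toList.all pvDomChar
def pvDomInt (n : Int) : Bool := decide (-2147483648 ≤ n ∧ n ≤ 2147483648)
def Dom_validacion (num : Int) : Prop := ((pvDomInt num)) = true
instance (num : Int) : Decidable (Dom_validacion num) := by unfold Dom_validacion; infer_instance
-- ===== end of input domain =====

-- B replaces A's per-digit tail recursion with a sign check, an explicit digit-list-building
-- loop, and a single all-pass over the digits (alternative decomposition, same cost).


-- ===== PORT A =====
def validacion (num : Int) : Bool :=
  if num ≠ 0 then
    if 0 ≤ PySem.Int.mod num 10 ∧ PySem.Int.mod num 10 ≤ 4 then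
      validacion (PySem.Int.floordiv num 10)
    else
      false
  else
    true
termination_by num.natAbs
decreasing_by
  have h1 := PySem.Int.floordiv_mul_add_mod num 10
  omega

-- ===== PORT B =====
-- B's while loop building the digit list; B only enters it with num ≥ 0, where the
-- Python guard 'num != 0' coincides with '0 < num' (the ≤-form keeps the Lean def total).
def pvDigitLoop (digits : List Int) (num : Int) : List Int :=
  if 0 < num then
    pvDigitLoop (digits ++ [PySem.Int.mod num 10]) (PySem.Int.floordiv num 10)
  else
    digits
termination_by num.toNat
decreasing_by
  have h1 := PySem.Int.floordiv_mul_add_mod num 10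
  have h2 := PySem.Int.mod_nonneg num (b := 10) (by norm_num)
  have h3 := PySem.Int.mod_lt num (b := 10) (by norm_num)
  omega

def validacion_alt (num : Int) : Bool :=
  if num < 0 then
    false
  else
    (pvDigitLoop [] num).all (fun d => decide (d ≤ 4))

-- ===== PRECONDITION & SPEC =====
def Spec_validacion (num : Int) (out : Bool) : Prop := out = validacion_alt num
instance (num : Int) (out : Bool) : Decidable (Spec_validacion num out) := by unfold Spec_validacion; infer_instance

-- ===== CLAIM (what is proved, stated in full; the proofs are below) =====
def Claim_equal_validacion : Prop := ∀ (num : Int), Dom_validacion num → Spec_validacion num (validacion num)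

-- ===== LEMMAS AND PROOFS =====

-- The accumulator only prefixes the result of B's digit loop.
theorem pvDigitLoop_acc : ∀ (n : Nat) (num : Int), num.toNat ≤ n →
    ∀ digits, pvDigitLoop digits num = digits ++ pvDigitLoop [] num := by
  intro n
  induction n with
  | zero =>
    intro num h digits
    have hle : ¬ 0 < num := by omega
    rw [pvDigitLoop, if_neg hle, pvDigitLoop, if_neg hle, List.append_nil]
  | succ n ih =>
    intro num h digits
    by_cases hpos : 0 < num
    · have h1 := PySem.Int.floordiv_mul_add_mod num 10
      have h2 := PySem.Int.mod_nonneg num (b := 10) (by norm_num)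
      have h3 := PySem.Int.mod_lt num (b := 10) (by norm_num)
      conv_lhs => rw [pvDigitLoop, if_pos hpos, ih _ (by omega)]
      conv_rhs => rw [pvDigitLoop, if_pos hpos, ih _ (by omega)]
      simp
    · rw [pvDigitLoop, if_neg hpos, pvDigitLoop, if_neg hpos, List.append_nil]

-- A returns false on every negative input.
theorem validacion_neg : ∀ (n : Nat) (num : Int), num.natAbs ≤ n → num < 0 →
    validacion num = false := by
  intro n
  induction n with
  | zero => intro num h hneg; omega
  | succ n ih =>
    intro num h hneg
    have h1 := PySem.Int.floordiv_mul_add_mod num 10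
    have h2 := PySem.Int.mod_nonneg num (b := 10) (by norm_num)
    have h3 := PySem.Int.mod_lt num (b := 10) (by norm_num)
    rw [validacion, if_pos (by omega)]
    by_cases hm : 0 ≤ PySem.Int.mod num 10 ∧ PySem.Int.mod num 10 ≤ 4
    · rw [if_pos hm]
      exact ih _ (by omega) (by omega)
    · rw [if_neg hm]

-- On nonnegative inputs A computes B's all-pass over the materialised digits.
theorem validacion_nonneg : ∀ (n : Nat) (num : Int), num.natAbs ≤ n → 0 ≤ num →
    validacion num = (pvDigitLoop [] num).all (fun d => decide (d ≤ 4)) := by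
  intro n
  induction n with
  | zero =>
    intro num h _
    have hz : num = 0 := by omega
    subst hz
    rw [validacion, if_neg (by omega), pvDigitLoop, if_neg (by omega)]
    rfl
  | succ n ih =>
    intro num h hpos
    by_cases hz : num = 0
    · subst hz
      rw [validacion, if_neg (by omega), pvDigitLoop, if_neg (by omega)]
      rfl
    · have h1 := PySem.Int.floordiv_mul_add_mod num 10
      have h2 := PySem.Int.mod_nonneg num (b := 10) (by norm_num)
      have h3 := PySem.Int.mod_lt num (b := 10) (by norm_num)
      have hm10 : PySem.Int.mod num 10 = num % 10 :=
        PySem.Int.mod_eq_emod_of_pos (by norm_num)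
      have hd : pvDigitLoop [] num
          = PySem.Int.mod num 10 :: pvDigitLoop [] (PySem.Int.floordiv num 10) := by
        rw [pvDigitLoop, if_pos (by omega), pvDigitLoop_acc (PySem.Int.floordiv num 10).toNat _ le_rfl]
        simp
      rw [validacion, if_pos hz, hd, List.all_cons]
      by_cases hm : PySem.Int.mod num 10 ≤ 4
      · rw [if_pos ⟨h2, hm⟩, ih (PySem.Int.floordiv num 10) (by omega) (by omega)]
        simp
        exact fun _ => by omega
      · rw [if_neg (fun hc => hm hc.2)]
        simp
        exact fun hc => absurd hc (by omega)

-- ===== VERDICT (by name: the statement is the Claim_ definition above) =====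
theorem validacion_spec : Claim_equal_validacion := by
  intro num _
  unfold Spec_validacion validacion_alt
  by_cases hneg : num < 0
  · rw [if_pos hneg, validacion_neg num.natAbs num le_rfl hneg]
  · rw [if_neg hneg, validacion_nonneg num.natAbs num le_rfl (by omega)]
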